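-- pv_equiv track=rewrite | github.com/oushihsabiy/pdfTojson-exercise | src/book/rawjson/jsonNaturalize.py | _strip_naturalize_meta
-- ===== SOURCE A (Python) =====
-- from typing import Any, Dict, List, Optional, Tuple
--
-- def _strip_naturalize_meta(rows: List[Dict[str, Any]]) -> List[Dict[str, Any]]:
--     out: List[Dict[str, Any]] = []
--     for row in rows:
--         r = dict(row)
--         r.pop("naturalize_status", None)
--         r.pop("naturalize_prompt_version", None)
--         r.pop("naturalize_notes", None)
--         out.append(r)
--     return out
-- ===== SOURCE B (Python) =====
-- from typing import Any, Dict, List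
--
-- def _strip_naturalize_meta(rows: List[Dict[str, Any]]) -> List[Dict[str, Any]]:
--     # Staged passes: one whole-list pass per metadata key, each rebuilding every
--     # row without that single key.
--     for key in ("naturalize_status", "naturalize_prompt_version", "naturalize_notes"):
--         rows = [{k: v for k, v in row.items() if k != key} for row in rows]
--     return rows
-- ===== Notes on version B (the rewrite author's own statement) =====
-- stated objective: alternative
-- what changed: A makes one pass over the rows, copying each dict and popping the three meta keys from the copy; B instead makes three staged whole-list passes, one per meta key, each pass rebuilding every row without that single key.
import Mathlib
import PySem

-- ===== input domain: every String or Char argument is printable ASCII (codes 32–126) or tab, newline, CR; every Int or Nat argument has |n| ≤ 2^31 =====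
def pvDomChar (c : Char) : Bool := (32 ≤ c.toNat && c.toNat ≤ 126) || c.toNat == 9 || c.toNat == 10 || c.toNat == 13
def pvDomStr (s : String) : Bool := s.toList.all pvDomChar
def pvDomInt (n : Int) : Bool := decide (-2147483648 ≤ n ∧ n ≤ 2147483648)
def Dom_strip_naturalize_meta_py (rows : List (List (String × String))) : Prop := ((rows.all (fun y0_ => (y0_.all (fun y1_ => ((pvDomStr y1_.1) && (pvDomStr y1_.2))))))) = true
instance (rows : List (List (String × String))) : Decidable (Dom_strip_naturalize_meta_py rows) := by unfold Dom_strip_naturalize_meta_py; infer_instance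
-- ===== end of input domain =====

-- B replaces A's single pass (copy each dict, pop three keys) by three staged
-- whole-list passes, one per meta key (alternative decomposition, same cost).

-- ===== PORT A =====
-- one loop iteration of A: r = dict(row); r.pop(k, None) three times; the resulting dict's items
def stripRowA (row : List (String × String)) : List (String × String) :=
  ((((PySem.Dict.ofList row).erase "naturalize_status").erase
      "naturalize_prompt_version").erase "naturalize_notes").items

def strip_naturalize_meta_py (rows : List (List (String × String))) : List (List (String × String)) :=
  rows.foldl (fun out row => out ++ [stripRowA row]) []

-- ===== PORT B =====
def metaKeys : List String := ["naturalize_status", "naturalize_prompt_version", "naturalize_notes"]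

-- one staged pass of B: rebuild every row without the single key `key`
def stripKeyPass (key : String) (rs : List (List (String × String))) : List (List (String × String)) :=
  rs.map (fun row => row.filter (fun kv => kv.1 != key))

def strip_naturalize_meta_py_alt (rows : List (List (String × String))) : List (List (String × String)) :=
  -- the input rows are Python dicts: their item lists
  metaKeys.foldl (fun rs key => stripKeyPass key rs)
    (rows.map (fun row => (PySem.Dict.ofList row).items))

-- ===== PRECONDITION & SPEC =====
def Spec_strip_naturalize_meta_py (rows : List (List (String × String))) (out : List (List (String × String))) : Prop := out = strip_naturalize_meta_py_alt rows
instance (rows : List (List (String × String))) (out : List (List (String × String))) : Decidable (Spec_strip_naturalize_meta_py rows out) := by unfold Spec_strip_naturalize_meta_py; infer_instance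

-- ===== CLAIM (what is proved, stated in full; the proofs are below) =====
def Claim_equal_strip_naturalize_meta_py : Prop := ∀ (rows : List (List (String × String))), Dom_strip_naturalize_meta_py rows → Spec_strip_naturalize_meta_py rows (strip_naturalize_meta_py rows)

-- ===== LEMMAS AND PROOFS =====

theorem erase_items (d : PySem.Dict String String) (k : String) :
    (d.erase k).items = d.items.filter (fun p => p.1 != k) := by
  cases d; rfl

theorem foldl_append_map {α β : Type} (f : α → β) (acc : List β) (l : List α) :
    l.foldl (fun out row => out ++ [f row]) acc = acc ++ l.map f := by
  induction l generalizing acc with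
  | nil => simp
  | cons x xs ih => simp [List.foldl, ih]

theorem stripRowA_eq (row : List (String × String)) :
    stripRowA row =
      (((PySem.Dict.ofList row).items.filter (fun p => p.1 != "naturalize_status")).filter
          (fun p => p.1 != "naturalize_prompt_version")).filter
        (fun p => p.1 != "naturalize_notes") := by
  unfold stripRowA
  rw [erase_items, erase_items, erase_items]

-- ===== VERDICT (by name: the statement is the Claim_ definition above) =====
theorem strip_naturalize_meta_py_spec : Claim_equal_strip_naturalize_meta_py := by
  intro rows _
  unfold Spec_strip_naturalize_meta_py strip_naturalize_meta_py strip_naturalize_meta_py_alt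
  rw [foldl_append_map stripRowA [] rows]
  simp [metaKeys, List.foldl, stripKeyPass, List.map_map, stripRowA_eq, Function.comp]
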